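-- pv_equiv track=rewrite | github.com/mlugard/Vagometro | transform/job_title_matcher.py | tag_job_title
-- ===== SOURCE A (Python) =====
-- def tag_job_title(job_title: str, match_terms: dict):
--     if not job_title:
--         return {
--             "matched_term": None,
--             "category": None
--         }
--
--     title_normalized = job_title.lower()
--
--     for category, terms in match_terms.items():
--         for term in terms:
--             if term in title_normalized:
--                 return {
--                     "matched_term": term,
--                     "category": category
--                 }
--
--     return {
--         "matched_term": "other",
--         "category": "other"
--     }
-- ===== SOURCE B (Python) =====
-- def tag_job_title(job_title: str, match_terms: dict):
--     if not job_title: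
--         return {"matched_term": None, "category": None}
--     t = job_title.lower()
--     maxlen = 0
--     for terms in match_terms.values():
--         for term in terms:
--             if len(term) > maxlen:
--                 maxlen = len(term)
--     subs = set()
--     for i in range(len(t) + 1):
--         for l in range(min(maxlen, len(t) - i) + 1):
--             subs.add(t[i:i + l])
--     for category, terms in match_terms.items():
--         for term in terms:
--             if term in subs:
--                 return {"matched_term": term, "category": category}
--     return {"matched_term": "other", "category": "other"}
-- ===== Notes on version B (the rewrite author's own statement) =====
-- stated objective: alternative
-- what changed: B precomputes the set of all substrings of the lowered title up to the maximum term length once, so each term is checked by a single set lookup instead of a substring search over the title.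
import Mathlib
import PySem

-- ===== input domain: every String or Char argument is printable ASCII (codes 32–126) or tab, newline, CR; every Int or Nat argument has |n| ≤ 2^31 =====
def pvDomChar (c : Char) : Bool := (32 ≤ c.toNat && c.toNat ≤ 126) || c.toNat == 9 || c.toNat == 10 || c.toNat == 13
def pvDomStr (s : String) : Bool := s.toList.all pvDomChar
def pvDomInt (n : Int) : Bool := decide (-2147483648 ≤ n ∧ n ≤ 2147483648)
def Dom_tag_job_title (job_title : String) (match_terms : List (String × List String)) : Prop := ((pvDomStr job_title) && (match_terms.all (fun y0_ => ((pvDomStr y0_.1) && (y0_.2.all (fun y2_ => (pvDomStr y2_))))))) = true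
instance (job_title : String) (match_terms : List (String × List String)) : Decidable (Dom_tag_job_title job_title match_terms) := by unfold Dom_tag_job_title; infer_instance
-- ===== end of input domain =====

-- B replaces A's per-term substring searches by one precomputed set of all title substrings
-- up to the maximum term length, looked up per term (objective: alternative indexing strategy).

-- ===== PORT A =====
-- inner 'for term in terms' with early return
def tagA_terms (titleNormalized : String) : List String → Option String
  | [] => none
  | term :: rest =>
    if PySem.Str.isIn term titleNormalized then some term
    else tagA_terms titleNormalized rest

-- outer 'for category, terms in match_terms.items()' with early return
def tagA_items (titleNormalized : String) : List (String × List String) → Option (String × String)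
  | [] => none
  | (category, terms) :: rest =>
    match tagA_terms titleNormalized terms with
    | some term => some (category, term)
    | none => tagA_items titleNormalized rest

def tag_job_title (job_title : String) (match_terms : List (String × List String)) : List (String × Option String) :=
  if job_title.toList = [] then [("matched_term", none), ("category", none)]
  else
    let titleNormalized := PySem.Str.lower job_title
    match tagA_items titleNormalized match_terms with
    | some (category, term) => [("matched_term", some term), ("category", some category)]
    | none => [("matched_term", some "other"), ("category", some "other")]

-- ===== PORT B =====
-- maxlen: running maximum of term lengths
def tagB_maxlen (match_terms : List (String × List String)) : Int :=
  match_terms.foldl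
    (fun m p => p.2.foldl (fun m term => if PySem.Str.len term > m then PySem.Str.len term else m) m)
    0

-- subs: the set of all slices t[i:i+l] with 0 ≤ i ≤ len(t), 0 ≤ l ≤ min(maxlen, len(t)-i)
def tagB_subs (t : String) (maxlen : Int) : PySem.Set String :=
  (PySem.List.pyRange 0 (PySem.Str.len t + 1)).foldl
    (fun s i =>
      (PySem.List.pyRange 0 (min maxlen (PySem.Str.len t - i) + 1)).foldl
        (fun s l => PySem.Set.add s (PySem.Str.slice t (some i) (some (i + l)))) s)
    PySem.Set.empty

def tagB_terms (subs : PySem.Set String) : List String → Option String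
  | [] => none
  | term :: rest =>
    if PySem.Set.contains subs term then some term
    else tagB_terms subs rest

def tagB_items (subs : PySem.Set String) : List (String × List String) → Option (String × String)
  | [] => none
  | (category, terms) :: rest =>
    match tagB_terms subs terms with
    | some term => some (category, term)
    | none => tagB_items subs rest

def tag_job_title_alt (job_title : String) (match_terms : List (String × List String)) : List (String × Option String) :=
  if job_title.toList = [] then [("matched_term", none), ("category", none)]
  else
    let t := PySem.Str.lower job_title
    let subs := tagB_subs t (tagB_maxlen match_terms)
    match tagB_items subs match_terms with
    | some (category, term) => [("matched_term", some term), ("category", some category)]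
    | none => [("matched_term", some "other"), ("category", some "other")]

-- ===== PRECONDITION & SPEC =====
def Spec_tag_job_title (job_title : String) (match_terms : List (String × List String)) (out : List (String × Option String)) : Prop := out = tag_job_title_alt job_title match_terms
instance (job_title : String) (match_terms : List (String × List String)) (out : List (String × Option String)) : Decidable (Spec_tag_job_title job_title match_terms out) := by unfold Spec_tag_job_title; infer_instance

-- ===== CLAIM (what is proved, stated in full; the proofs are below) =====
def Claim_equal_tag_job_title : Prop := ∀ (job_title : String) (match_terms : List (String × List String)), Dom_tag_job_title job_title match_terms → Spec_tag_job_title job_title match_terms (tag_job_title job_title match_terms)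

-- ===== LEMMAS AND PROOFS =====

-- membership in a fold of Set.add over computed elements
theorem mem_foldl_add {α β : Type} [BEq α] [LawfulBEq α] (f : β → α) (l : List β)
    (s : PySem.Set α) (y : α) :
    y ∈ l.foldl (fun s x => PySem.Set.add s (f x)) s ↔ y ∈ s ∨ ∃ x ∈ l, f x = y := by
  induction l generalizing s with
  | nil => simp
  | cons a l ih =>
    simp only [List.foldl_cons, ih, PySem.Set.mem_add, List.mem_cons]
    constructor
    · rintro ((h | h) | ⟨x, hx, hfx⟩)
      · exact Or.inl h
      · exact Or.inr ⟨a, Or.inl rfl, h.symm⟩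
      · exact Or.inr ⟨x, Or.inr hx, hfx⟩
    · rintro (h | ⟨x, (rfl | hx), hfx⟩)
      · exact Or.inl (Or.inl h)
      · exact Or.inl (Or.inr hfx.symm)
      · exact Or.inr ⟨x, hx, hfx⟩

-- membership in the nested fold building tagB_subs
theorem mem_foldl_add_nested {α β γ : Type} [BEq α] [LawfulBEq α]
    (r : β → List γ) (f : β → γ → α) (l : List β) (s : PySem.Set α) (y : α) :
    y ∈ l.foldl (fun s i => (r i).foldl (fun s x => PySem.Set.add s (f i x)) s) s ↔
      y ∈ s ∨ ∃ i ∈ l, ∃ x ∈ r i, f i x = y := by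
  induction l generalizing s with
  | nil => simp
  | cons a l ih =>
    simp only [List.foldl_cons, ih, mem_foldl_add, List.mem_cons]
    constructor
    · rintro ((h | ⟨x, hx, hfx⟩) | ⟨i, hi, hx⟩)
      · exact Or.inl h
      · exact Or.inr ⟨a, Or.inl rfl, x, hx, hfx⟩
      · exact Or.inr ⟨i, Or.inr hi, hx⟩
    · rintro (h | ⟨i, (rfl | hi), hx⟩)
      · exact Or.inl (Or.inl h)
      · exact Or.inl (Or.inr hx)
      · exact Or.inr ⟨i, hi, hx⟩

-- membership in subs ↔ substring search succeeds, for terms no longer than maxlen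
theorem mem_subs_core (t : String) (maxlen : Int) (term : String)
    (hlen : (term.toList.length : Int) ≤ maxlen) :
    (∃ i ∈ PySem.List.pyRange 0 (PySem.Str.len t + 1),
      ∃ l ∈ PySem.List.pyRange 0 (min maxlen (PySem.Str.len t - i) + 1),
        PySem.Str.slice t (some i) (some (i + l)) = term) ↔
      PySem.Str.isIn term t = true := by
  rw [PySem.Str.len_eq, PySem.Str.isIn_eq, ← PySem.Chars.exists_prefix_drop_iff_isIn]
  constructor
  · rintro ⟨i, hi, l, hl, hslice⟩
    rw [PySem.List.mem_pyRange_one] at hi hl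
    obtain ⟨iN, rfl⟩ : ∃ iN : Nat, i = (iN : Int) := ⟨i.toNat, (Int.toNat_of_nonneg hi.1).symm⟩
    obtain ⟨lN, rfl⟩ : ∃ lN : Nat, l = (lN : Int) := ⟨l.toNat, (Int.toNat_of_nonneg hl.1).symm⟩
    refine ⟨iN, ?_⟩
    have htl : (PySem.Str.slice t (some (iN:Int)) (some ((iN:Int) + (lN:Int)))).toList = term.toList := by
      rw [hslice]
    rw [PySem.Str.toList_slice] at htl
    have : List.take lN (List.drop iN t.toList) = term.toList := by
      rw [← PySem.List.slice_natCast_add t.toList iN lN]; exact htl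
    rw [← this]
    exact List.take_prefix _ _
  · rintro ⟨j, hpre⟩
    set N := t.toList.length with hN
    have hpre' : term.toList <+: List.drop (min j N) t.toList := by
      by_cases hj : j ≤ N
      · rwa [min_eq_left hj]
      · have hd : List.drop j t.toList = [] := List.drop_eq_nil_of_le (by omega)
        rw [hd, List.prefix_nil] at hpre
        simp [hpre]
    set jN := min j N with hjN
    set lN := term.toList.length with hlN
    have hjle : jN ≤ N := min_le_right _ _
    have hlle : lN ≤ N - jN := by
      have := hpre'.length_le
      rw [List.length_drop] at this
      omega
    refine ⟨(jN : Int), ?_, (lN : Int), ?_, ?_⟩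
    · rw [PySem.List.mem_pyRange_one]; omega
    · rw [PySem.List.mem_pyRange_one]
      constructor
      · omega
      · have h1 : (lN : Int) ≤ min maxlen ((N : Int) - (jN : Int)) := by
          rw [le_min_iff]
          constructor
          · exact hlen
          · omega
        omega
    · rw [← String.toList_inj, PySem.Str.toList_slice]
      show PySem.List.slice t.toList (some (jN:Int)) (some ((jN:Int) + (lN:Int))) = term.toList
      rw [PySem.List.slice_natCast_add]
      exact (List.prefix_iff_eq_take.1 hpre').symm

theorem mem_subs_iff (t : String) (maxlen : Int) (term : String)
    (hlen : (term.toList.length : Int) ≤ maxlen) :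
    term ∈ tagB_subs t maxlen ↔ PySem.Str.isIn term t = true := by
  unfold tagB_subs
  rw [mem_foldl_add_nested
    (fun i => PySem.List.pyRange 0 (min maxlen (PySem.Str.len t - i) + 1))
    (fun i l => PySem.Str.slice t (some i) (some (i + l)))]
  rw [← mem_subs_core t maxlen term hlen]
  constructor
  · rintro (h | h)
    · exact absurd h (by simp [PySem.Set.empty])
    · exact h
  · exact Or.inr

theorem contains_subs (t : String) (maxlen : Int) (term : String)
    (hlen : (term.toList.length : Int) ≤ maxlen) :
    PySem.Set.contains (tagB_subs t maxlen) term = PySem.Str.isIn term t := by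
  by_cases hm : term ∈ tagB_subs t maxlen
  · rw [(PySem.Set.contains_iff _ _).2 hm, (mem_subs_iff t maxlen term hlen).1 hm]
  · have h1 : PySem.Set.contains (tagB_subs t maxlen) term = false := by
      cases hb : PySem.Set.contains (tagB_subs t maxlen) term
      · rfl
      · exact absurd ((PySem.Set.contains_iff _ _).1 hb) hm
    have h2 : PySem.Str.isIn term t = false := by
      cases hb : PySem.Str.isIn term t
      · rfl
      · exact absurd ((mem_subs_iff t maxlen term hlen).2 hb) hm
    rw [h1, h2]



theorem inner_mono (l : List String) (m : Int) :
    m ≤ l.foldl (fun m term => if PySem.Str.len term > m then PySem.Str.len term else m) m := by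
  induction l generalizing m with
  | nil => simp
  | cons a l ih =>
    refine le_trans ?_ (ih _)
    dsimp only
    split <;> omega

theorem inner_bound (l : List String) (m : Int) :
    ∀ term ∈ l, PySem.Str.len term ≤ l.foldl (fun m term => if PySem.Str.len term > m then PySem.Str.len term else m) m := by
  induction l generalizing m with
  | nil => simp
  | cons a l ih =>
    intro term hterm
    rcases List.mem_cons.1 hterm with rfl | h
    · refine le_trans ?_ (inner_mono l _)
      dsimp only
      split <;> omega
    · exact ih _ term h

theorem outer_mono (mts : List (String × List String)) (m : Int) :
    m ≤ mts.foldl (fun m p => p.2.foldl (fun m term => if PySem.Str.len term > m then PySem.Str.len term else m) m) m := by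
  induction mts generalizing m with
  | nil => simp
  | cons a l ih => exact le_trans (inner_mono a.2 m) (ih _)

theorem outer_bound (mts : List (String × List String)) (m : Int) :
    ∀ p ∈ mts, ∀ term ∈ p.2, PySem.Str.len term ≤
      mts.foldl (fun m p => p.2.foldl (fun m term => if PySem.Str.len term > m then PySem.Str.len term else m) m) m := by
  induction mts generalizing m with
  | nil => simp
  | cons a l ih =>
    intro p hp term hterm
    rcases List.mem_cons.1 hp with rfl | h
    · exact le_trans (inner_bound p.2 m term hterm) (outer_mono l _)
    · exact ih _ p h term hterm

theorem tagB_maxlen_bound (match_terms : List (String × List String)) :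
    ∀ p ∈ match_terms, ∀ term ∈ p.2, (term.toList.length : Int) ≤ tagB_maxlen match_terms := by
  intro p hp term hterm
  rw [← PySem.Str.len_eq]
  exact outer_bound match_terms 0 p hp term hterm

theorem tagB_terms_eq (subs : PySem.Set String) (t : String) (terms : List String)
    (h : ∀ term ∈ terms, PySem.Set.contains subs term = PySem.Str.isIn term t) :
    tagB_terms subs terms = tagA_terms t terms := by
  induction terms with
  | nil => rfl
  | cons a l ih =>
    simp only [tagB_terms, tagA_terms, h a (List.mem_cons_self),
      ih (fun x hx => h x (List.mem_cons_of_mem _ hx))]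

theorem tagB_items_eq (subs : PySem.Set String) (t : String) (items : List (String × List String))
    (h : ∀ p ∈ items, ∀ term ∈ p.2, PySem.Set.contains subs term = PySem.Str.isIn term t) :
    tagB_items subs items = tagA_items t items := by
  induction items with
  | nil => rfl
  | cons a l ih =>
    obtain ⟨c, terms⟩ := a
    simp only [tagB_items, tagA_items,
      tagB_terms_eq subs t terms (h _ (List.mem_cons_self)),
      ih (fun p hp => h p (List.mem_cons_of_mem _ hp))]

-- ===== VERDICT (by name: the statement is the Claim_ definition above) =====
theorem tag_job_title_spec : Claim_equal_tag_job_title := by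
  intro job_title match_terms _
  unfold Spec_tag_job_title tag_job_title tag_job_title_alt
  split
  · rfl
  · show (match tagA_items (PySem.Str.lower job_title) match_terms with
      | some (category, term) => [("matched_term", some term), ("category", some category)]
      | none => [("matched_term", some "other"), ("category", some "other")]) =
      (match tagB_items (tagB_subs (PySem.Str.lower job_title) (tagB_maxlen match_terms)) match_terms with
      | some (category, term) => [("matched_term", some term), ("category", some category)]
      | none => [("matched_term", some "other"), ("category", some "other")])
    rw [tagB_items_eq _ (PySem.Str.lower job_title) match_terms
      (fun p hp term hterm =>
        contains_subs _ _ _ (tagB_maxlen_bound match_terms p hp term hterm))]
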